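-- pv_equiv track=rewrite | github.com/rsbowman-striveworks/advent_of_code_2023 | day03/day03.py | parse
-- ===== SOURCE A (Python) =====
-- def parse(line: str):
--     numbers, parts = [], []
--     i = 0
--     while i < len(line):
--         if line[i].isdigit():
--             i_start = i
--             while i < len(line) and line[i].isdigit():
--                 i += 1
--             i_end = i
--             n = int(line[i_start:i_end])
--             numbers.append((n, i_start, i_end))
--             i -= 1
--         elif line[i] != ".":
--             parts.append(i)
--         i += 1
--
--     return numbers, parts
-- ===== SOURCE B (Python) =====
-- def parse(line: str):
--     n = len(line)
--     d = [c.isdigit() for c in line]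
--     starts = [i for i in range(n) if d[i] and (i == 0 or not d[i - 1])]
--     ends = [i + 1 for i in range(n) if d[i] and (i + 1 == n or not d[i + 1])]
--     numbers = [(int(line[s:e]), s, e) for s, e in zip(starts, ends)]
--     parts = [i for i in range(n) if not d[i] and line[i] != "."]
--     return numbers, parts
-- ===== Notes on version B (the rewrite author's own statement) =====
-- stated objective: alternative
-- what changed: Replaces A's index-juggling while-loop (inner run scan with an i -= 1 back-step) by three independent comprehensions computing run-start indices, run-end indices and part-symbol positions, with numbers built by zipping starts with ends.
import Mathlib
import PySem

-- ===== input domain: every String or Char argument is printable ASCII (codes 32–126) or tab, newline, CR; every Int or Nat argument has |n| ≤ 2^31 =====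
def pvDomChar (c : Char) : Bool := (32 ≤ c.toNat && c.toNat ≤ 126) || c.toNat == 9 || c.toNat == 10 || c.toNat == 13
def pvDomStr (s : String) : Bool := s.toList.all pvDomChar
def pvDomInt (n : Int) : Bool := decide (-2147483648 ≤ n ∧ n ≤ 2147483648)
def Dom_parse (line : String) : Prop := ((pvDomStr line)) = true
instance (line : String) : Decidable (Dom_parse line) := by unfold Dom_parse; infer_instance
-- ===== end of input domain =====

-- B replaces A's index-juggling while-loop (inner run scan, i -= 1 back-step) by three
-- independent comprehensions for run starts, run ends and part positions, zipped together
-- (objective: alternative decomposition, same O(n) cost).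

-- ===== PORT A =====
-- inner while loop: 'while i < len(line) and line[i].isdigit(): i += 1'
def runEnd (cs : List Char) (i : Nat) : Nat :=
  if h : i < cs.length then
    if PySem.Chars.isdigit cs[i] then runEnd cs (i + 1) else i
  else i
termination_by cs.length - i

theorem runEnd_ge (cs : List Char) (i : Nat) : i ≤ runEnd cs i := by
  fun_induction runEnd cs i <;> omega

theorem runEnd_gt (cs : List Char) (i : Nat) (h : i < cs.length)
    (hd : PySem.Chars.isdigit cs[i] = true) : i < runEnd cs i := by
  rw [runEnd]
  simp only [h, hd, dif_pos, if_pos]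
  have := runEnd_ge cs (i + 1)
  omega

-- outer while loop of A; nums/parts are the two accumulator lists.
-- int(line[i_start:i_end]): on a digit run ofChars? is always some, the getD 0 default is unreachable.
def parseGo (cs : List Char) (i : Nat) (nums : List (Int × Int × Int)) (parts : List Int) :
    (List (Int × Int × Int)) × List Int :=
  if h : i < cs.length then
    if hd : PySem.Chars.isdigit cs[i] then
      -- i_start = i, i_end = runEnd cs i, n = int(line[i_start:i_end]);
      -- 'i -= 1' then 'i += 1' at the loop foot: next index is (i_end - 1) + 1
      parseGo cs ((runEnd cs i - 1) + 1)
        (nums ++ [((PySem.Int.ofChars? (PySem.List.slice cs (some (i : Int)) (some ((runEnd cs i : Nat) : Int)))).getD 0,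
          (i : Int), ((runEnd cs i : Nat) : Int))]) parts
    else if cs[i] ≠ '.' then
      parseGo cs (i + 1) nums (parts ++ [(i : Int)])
    else
      parseGo cs (i + 1) nums parts
  else (nums, parts)
termination_by cs.length - i
decreasing_by
  · have := runEnd_gt cs i h hd; omega
  · omega
  · omega

def parse (line : String) : (List (Int × Int × Int)) × List Int :=
  parseGo line.toList 0 [] []

-- ===== PORT B =====
-- all list indices d[i], d[i-1], d[i+1], line[i] are in range (short-circuit guards), so getD is exact.
def parse_alt (line : String) : (List (Int × Int × Int)) × List Int :=
  let cs := line.toList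
  let n := cs.length
  let d := cs.map PySem.Chars.isdigit
  let starts := (List.range n).filter (fun i => d.getD i false && (i == 0 || !(d.getD (i - 1) false)))
  let ends : List Nat := ((List.range n).filter (fun i => d.getD i false && (i + 1 == n || !(d.getD (i + 1) false)))).map (fun i => i + 1)
  let numbers := (starts.zip ends).map (fun p =>
    ((PySem.Int.ofChars? (PySem.List.slice cs (some (p.1 : Int)) (some (p.2 : Int)))).getD 0,
      (p.1 : Int), (p.2 : Int)))
  let parts := ((List.range n).filter (fun i => !(d.getD i false) && cs.getD i ' ' != '.')).map (fun i => (i : Int))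
  (numbers, parts)

-- ===== PRECONDITION & SPEC =====
def Spec_parse (line : String) (out : (List (Int × Int × Int)) × List Int) : Prop := out = parse_alt line
instance (line : String) (out : (List (Int × Int × Int)) × List Int) : Decidable (Spec_parse line out) := by unfold Spec_parse; infer_instance

-- ===== CLAIM (what is proved, stated in full; the proofs are below) =====
def Claim_equal_parse : Prop := ∀ (line : String), Dom_parse line → Spec_parse line (parse line)

-- ===== LEMMAS AND PROOFS =====

-- 'is a digit' as B's bounds-safe list lookup
def dg (cs : List Char) (i : Nat) : Bool := (cs.map PySem.Chars.isdigit).getD i false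

theorem dg_lt (cs : List Char) (i : Nat) (h : i < cs.length) :
    dg cs i = PySem.Chars.isdigit cs[i] := by
  simp [dg, List.getD_eq_getElem?_getD, List.getElem?_map, List.getElem?_eq_getElem h]

theorem dg_ge (cs : List Char) (i : Nat) (h : cs.length ≤ i) : dg cs i = false := by
  simp [dg, List.getD_eq_getElem?_getD, h]

-- B's three filter predicates
def sP (cs : List Char) (i : Nat) : Bool := dg cs i && (i == 0 || !(dg cs (i - 1)))
def eP (cs : List Char) (i : Nat) : Bool := dg cs i && (i + 1 == cs.length || !(dg cs (i + 1)))
def qP (cs : List Char) (i : Nat) : Bool := !(dg cs i) && (cs.getD i ' ' != '.')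

def numF (cs : List Char) (p : Nat × Nat) : Int × Int × Int :=
  ((PySem.Int.ofChars? (PySem.List.slice cs (some (p.1 : Int)) (some (p.2 : Int)))).getD 0,
    (p.1 : Int), (p.2 : Int))

theorem runEnd_le (cs : List Char) (i : Nat) (h : i ≤ cs.length) : runEnd cs i ≤ cs.length := by
  fun_induction runEnd cs i <;> omega

theorem runEnd_digits (cs : List Char) (i : Nat) :
    ∀ j, i ≤ j → j < runEnd cs i → dg cs j = true := by
  fun_induction runEnd cs i with
  | case1 i h hd ih =>
    intro j hj1 hj2
    rcases Nat.eq_or_lt_of_le hj1 with rfl | hlt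
    · exact (dg_lt cs i h).trans hd
    · exact ih j hlt hj2
  | case2 i h hd => intro j h1 h2; omega
  | case3 i h => intro j h1 h2; omega

theorem runEnd_stop (cs : List Char) (i : Nat) : dg cs (runEnd cs i) = false := by
  fun_induction runEnd cs i with
  | case1 i h hd ih => exact ih
  | case2 i h hd => exact (dg_lt cs i h).trans (by simpa using hd)
  | case3 i h => exact dg_ge cs i (by omega)

theorem range'_split (s m n : Nat) (h1 : s ≤ m) (h2 : m ≤ n) :
    List.range' s (n - s) = List.range' s (m - s) ++ List.range' m (n - m) := by
  have := @List.range'_append s (m - s) (n - m) 1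
  simp only [Nat.one_mul] at this
  rw [Nat.add_sub_cancel' h1] at this
  rw [this]
  congr 1
  omega

theorem range'_cons (s n : Nat) (h : s < n) :
    List.range' s (n - s) = s :: List.range' (s + 1) (n - (s + 1)) := by
  rw [show n - s = (n - (s + 1)) + 1 from by omega, List.range'_succ]

-- main invariant: at any loop entry index i that is not strictly inside a digit run,
-- A's loop appends exactly B's zipped/filtered tails of range' i (len - i).
theorem go_spec (cs : List Char) (i : Nat)
    (H : dg cs i = false ∨ i = 0 ∨ dg cs (i - 1) = false)
    (nums : List (Int × Int × Int)) (parts : List Int) :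
    parseGo cs i nums parts =
      (nums ++ (((List.range' i (cs.length - i)).filter (sP cs)).zip
                (((List.range' i (cs.length - i)).filter (eP cs)).map (fun j => j + 1))).map (numF cs),
       parts ++ ((List.range' i (cs.length - i)).filter (qP cs)).map (fun j => (j : Int))) := by
  rw [parseGo]
  by_cases h : i < cs.length
  · have hdg := dg_lt cs i h
    by_cases hd : PySem.Chars.isdigit cs[i] = true
    · rw [dif_pos h, dif_pos hd]
      obtain ⟨e, he⟩ : ∃ e, runEnd cs i = e := ⟨_, rfl⟩
      rw [he]
      have hie : i < e := he ▸ runEnd_gt cs i h hd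
      have hel : e ≤ cs.length := he ▸ runEnd_le cs i (by omega)
      have hrun : ∀ j, i ≤ j → j < e → dg cs j = true := he ▸ runEnd_digits cs i
      have hstop : dg cs e = false := he ▸ runEnd_stop cs i
      have hsplit : List.range' i (cs.length - i) =
          List.range' i (e - i) ++ List.range' e (cs.length - e) :=
        range'_split i e cs.length (by omega) hel
      have hcons : List.range' i (e - i) = i :: List.range' (i + 1) (e - (i + 1)) := by
        exact range'_cons i e hie
      have hsplit2 : List.range' i (e - i) = List.range' i (e - 1 - i) ++ [e - 1] := by
        have h1 := range'_split i (e - 1) e (by omega) (by omega)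
        have h2 : e - (e - 1) = 1 := by omega
        rw [h2] at h1
        simpa using h1
      -- starts in [i, e) : exactly i
      have hS : (List.range' i (e - i)).filter (sP cs) = [i] := by
        rw [hcons]
        simp only [List.filter_cons]
        have hsi : sP cs i = true := by
          have hor : (i == 0 || !(dg cs (i - 1))) = true := by
            rcases H with H | H | H
            · rw [hdg, hd] at H; exact absurd H (by simp)
            · simp [H]
            · simp [H]
          simp [sP, hdg, hd, hor]
        rw [if_pos hsi, List.filter_eq_nil_iff.mpr]
        intro j hj
        have hj' := List.mem_range'_1.mp hj
        have hdj : dg cs (j - 1) = true := hrun (j - 1) (by omega) (by omega)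
        have hj0 : (j == 0) = false := by simp; omega
        simp [sP, hdj, hj0]
      -- ends in [i, e) : exactly e - 1
      have hE : (List.range' i (e - i)).filter (eP cs) = [e - 1] := by
        rw [hsplit2, List.filter_append]
        have h1 : (List.range' i (e - 1 - i)).filter (eP cs) = [] := by
          rw [List.filter_eq_nil_iff]
          intro j hj
          have hj' := List.mem_range'_1.mp hj
          have hd1 : dg cs (j + 1) = true := hrun (j + 1) (by omega) (by omega)
          have hjn : (j + 1 == cs.length) = false := by simp; omega
          simp [eP, hd1, hjn]
        have h2 : eP cs (e - 1) = true := by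
          have hd1 : dg cs (e - 1) = true := hrun (e - 1) (by omega) (by omega)
          have h3 : e - 1 + 1 = e := by omega
          simp only [eP, hd1, Bool.true_and, h3]
          rcases Nat.eq_or_lt_of_le hel with heq | hlt
          · simp [heq]
          · simp [hstop]
        simp [h1, h2]
      -- no parts inside the run
      have hQ : (List.range' i (e - i)).filter (qP cs) = [] := by
        rw [List.filter_eq_nil_iff]
        intro j hj
        have hj' := List.mem_range'_1.mp hj
        simp [qP, hrun j (by omega) (by omega)]
      have hnext : e - 1 + 1 = e := by omega
      rw [hnext]
      rw [go_spec cs e (Or.inl hstop)]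
      rw [hsplit, List.filter_append, List.filter_append, List.filter_append, hS, hE, hQ]
      simp [numF, hnext, List.append_assoc]
    · rw [dif_pos h, dif_neg hd]
      have hdgf : dg cs i = false := by rw [hdg]; simpa using hd
      have hcons : List.range' i (cs.length - i) = i :: List.range' (i + 1) (cs.length - (i + 1)) := by
        exact range'_cons i cs.length h
      have hsi : sP cs i = false := by simp [sP, hdgf]
      have hei : eP cs i = false := by simp [eP, hdgf]
      have hqi : qP cs i = (cs.getD i ' ' != '.') := by simp [qP, hdgf]
      have hget' : cs[i]?.getD ' ' = cs[i] := by simp [List.getElem?_eq_getElem h]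
      have hH' : dg cs ((i + 1) - 1) = false := by simpa using hdgf
      by_cases hdot : cs[i] = '.'
      · rw [if_neg (by simp [hdot])]
        rw [go_spec cs (i + 1) (Or.inr (Or.inr hH'))]
        rw [hcons]
        simp [hsi, hei, hqi, hget', hdot]
      · rw [if_pos hdot]
        rw [go_spec cs (i + 1) (Or.inr (Or.inr hH'))]
        rw [hcons]
        simp [hsi, hei, hqi, hget', hdot]
  · rw [dif_neg h]
    have h0 : cs.length - i = 0 := by omega
    simp [h0]
termination_by cs.length - i
decreasing_by all_goals omega

-- ===== VERDICT (by name: the statement is the Claim_ definition above) =====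
theorem parse_spec : Claim_equal_parse := by
  intro line _
  unfold Spec_parse parse parse_alt
  rw [go_spec line.toList 0 (Or.inr (Or.inl rfl))]
  simp only [Nat.sub_zero, List.nil_append, List.range_eq_range']
  rfl
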